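-- pv_equiv track=rewrite | github.com/Helly1206/Domo_app_weather | app_weatherd/YahooWeather.py | _getPrecipation
-- ===== SOURCE A (Python) =====
-- def _getPrecipation(input):
--     # precipation is unavialable, so lets guess from text information
--     precip = 0
--     p1 = ['drizzle', 'light snow showers', 'blowing snow', 'sleet', 'haze']
--     p2 = ['mixed', 'freezing rain', 'snow flurries', 'hail', 'isolated thunderstorms', 'scattered', 'thundershowers', 'snow showers']
--     p3 = ['showers', 'snow']
--     p4 = ['tornado', 'tropical storm', 'hurricane', 'thunderstorms', 'heavy snow']
--     p6 = ['severe thunderstorms']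
--     if any(x in input.lower() for x in p1):
--         precip = 1
--     elif any(x in input.lower() for x in p2):
--         precip = 2
--     elif any(x in input.lower() for x in p3):
--         precip = 3
--     elif any(x in input.lower() for x in p4):
--         precip = 4
--     elif any(x in input.lower() for x in p6):
--         precip = 6
--
--     return precip
-- ===== SOURCE B (Python) =====
-- def _getPrecipation(input):
--     # One uniform scan: flat keyword->level table, collect all matched levels, return their minimum.
--     table = [
--         ('drizzle', 1), ('light snow showers', 1), ('blowing snow', 1), ('sleet', 1), ('haze', 1),
--         ('mixed', 2), ('freezing rain', 2), ('snow flurries', 2), ('hail', 2),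
--         ('isolated thunderstorms', 2), ('scattered', 2), ('thundershowers', 2), ('snow showers', 2),
--         ('showers', 3), ('snow', 3),
--         ('tornado', 4), ('tropical storm', 4), ('hurricane', 4), ('thunderstorms', 4), ('heavy snow', 4),
--         ('severe thunderstorms', 6),
--     ]
--     text = input.lower()
--     matched = [level for kw, level in table if kw in text]
--     return min(matched) if matched else 0
-- ===== Notes on version B (the rewrite author's own statement) =====
-- stated objective: simpler
-- what changed: Replaces the five short-circuit elif branches (each re-lowercasing the input and running its own any()) with a single lowercase pass and one uniform scan over a flat keyword-to-level table, returning the minimum matched level (0 if none); the minimum reproduces the priority order because levels are listed in increasing order.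
import Mathlib
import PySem

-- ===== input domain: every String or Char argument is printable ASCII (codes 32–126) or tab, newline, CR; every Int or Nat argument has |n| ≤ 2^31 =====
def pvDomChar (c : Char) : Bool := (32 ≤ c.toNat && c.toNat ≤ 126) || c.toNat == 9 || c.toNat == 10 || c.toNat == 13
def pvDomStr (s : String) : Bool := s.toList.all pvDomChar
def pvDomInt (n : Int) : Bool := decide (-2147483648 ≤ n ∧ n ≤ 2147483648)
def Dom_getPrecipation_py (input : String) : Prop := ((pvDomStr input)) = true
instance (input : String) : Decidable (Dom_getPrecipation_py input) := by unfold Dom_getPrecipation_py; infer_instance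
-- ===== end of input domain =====

-- B replaces A's five short-circuit elif branches with one lowercase pass and a single
-- uniform scan over a flat keyword->level table, returning the minimum matched level.

-- ===== PORT A =====
def pvP1 : List String := ["drizzle", "light snow showers", "blowing snow", "sleet", "haze"]
def pvP2 : List String := ["mixed", "freezing rain", "snow flurries", "hail", "isolated thunderstorms", "scattered", "thundershowers", "snow showers"]
def pvP3 : List String := ["showers", "snow"]
def pvP4 : List String := ["tornado", "tropical storm", "hurricane", "thunderstorms", "heavy snow"]
def pvP6 : List String := ["severe thunderstorms"]

def getPrecipation_py (input : String) : Int :=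
  let precip : Int := 0
  if pvP1.any (fun x => PySem.Str.isIn x (PySem.Str.lower input)) then 1
  else if pvP2.any (fun x => PySem.Str.isIn x (PySem.Str.lower input)) then 2
  else if pvP3.any (fun x => PySem.Str.isIn x (PySem.Str.lower input)) then 3
  else if pvP4.any (fun x => PySem.Str.isIn x (PySem.Str.lower input)) then 4
  else if pvP6.any (fun x => PySem.Str.isIn x (PySem.Str.lower input)) then 6
  else precip

-- ===== PORT B =====
def pvTable : List (String × Int) :=
  [("drizzle", 1), ("light snow showers", 1), ("blowing snow", 1), ("sleet", 1), ("haze", 1),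
   ("mixed", 2), ("freezing rain", 2), ("snow flurries", 2), ("hail", 2),
   ("isolated thunderstorms", 2), ("scattered", 2), ("thundershowers", 2), ("snow showers", 2),
   ("showers", 3), ("snow", 3),
   ("tornado", 4), ("tropical storm", 4), ("hurricane", 4), ("thunderstorms", 4), ("heavy snow", 4),
   ("severe thunderstorms", 6)]

def getPrecipation_py_alt (input : String) : Int :=
  let text := PySem.Str.lower input
  let matched := (pvTable.filter (fun p => PySem.Str.isIn p.1 text)).map (fun p => p.2)
  match PySem.List.min? matched (fun x => x) with
  | some m => m
  | none => 0

-- ===== PRECONDITION & SPEC =====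
def Spec_getPrecipation_py (input : String) (out : Int) : Prop := out = getPrecipation_py_alt input
instance (input : String) (out : Int) : Decidable (Spec_getPrecipation_py input out) := by unfold Spec_getPrecipation_py; infer_instance

-- ===== CLAIM (what is proved, stated in full; the proofs are below) =====
def Claim_equal_getPrecipation_py : Prop := ∀ (input : String), Dom_getPrecipation_py input → Spec_getPrecipation_py input (getPrecipation_py input)

-- ===== LEMMAS AND PROOFS =====

-- min(xs) equals any member that is a lower bound of xs
lemma pv_min?_eq_of_mem_of_le (xs : List Int) (m : Int) (hm : m ∈ xs)
    (hall : ∀ y ∈ xs, m ≤ y) : PySem.List.min? xs (fun x => x) = some m := by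
  cases h : PySem.List.min? xs (fun x => x) with
  | none =>
      have : xs = [] := (PySem.List.min?_eq_none_iff _ _).mp h
      simp [this] at hm
  | some k =>
      have hkmem : k ∈ xs := PySem.List.min?_mem h
      have h1 : k ≤ m := PySem.List.min?_isMin h m hm
      have h2 : m ≤ k := hall k hkmem
      have : k = m := le_antisymm h1 h2
      simp [this]

-- the elif chain over class lists equals min over the flat filtered table, for ANY match predicate c
lemma pv_chain_eq_min (c : String → Bool) :
    (if pvP1.any c then (1 : Int)
     else if pvP2.any c then 2
     else if pvP3.any c then 3
     else if pvP4.any c then 4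
     else if pvP6.any c then 6
     else 0)
    = (match PySem.List.min? ((pvTable.filter (fun p => c p.1)).map (fun p => p.2)) (fun x => x) with
       | some m => m
       | none => 0) := by
  have hmem : ∀ y : Int, y ∈ (pvTable.filter (fun p => c p.1)).map (fun p => p.2) ↔
      ∃ p : String × Int, p ∈ pvTable ∧ c p.1 = true ∧ p.2 = y := by
    intro y
    simp only [List.mem_map, List.mem_filter]
    constructor
    · rintro ⟨p, ⟨hp, hc⟩, hy⟩; exact ⟨p, hp, hc, hy⟩
    · rintro ⟨p, hp, hc, hy⟩; exact ⟨p, ⟨hp, hc⟩, hy⟩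
  have cov : ∀ p : String × Int, p ∈ pvTable →
      (p.1 ∈ pvP1 ∧ p.2 = 1) ∨ (p.1 ∈ pvP2 ∧ p.2 = 2) ∨ (p.1 ∈ pvP3 ∧ p.2 = 3) ∨
      (p.1 ∈ pvP4 ∧ p.2 = 4) ∨ (p.1 ∈ pvP6 ∧ p.2 = 6) := by decide
  have t1 : ∀ x ∈ pvP1, ((x, (1:Int))) ∈ pvTable := by decide
  have t2 : ∀ x ∈ pvP2, ((x, (2:Int))) ∈ pvTable := by decide
  have t3 : ∀ x ∈ pvP3, ((x, (3:Int))) ∈ pvTable := by decide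
  have t4 : ∀ x ∈ pvP4, ((x, (4:Int))) ∈ pvTable := by decide
  have t6 : ∀ x ∈ pvP6, ((x, (6:Int))) ∈ pvTable := by decide
  by_cases h1 : pvP1.any c = true
  · obtain ⟨x, hx, hcx⟩ := List.any_eq_true.mp h1
    have hm : (1 : Int) ∈ (pvTable.filter (fun p => c p.1)).map (fun p => p.2) :=
      (hmem 1).mpr ⟨(x, 1), t1 x hx, hcx, rfl⟩
    have hall : ∀ y ∈ (pvTable.filter (fun p => c p.1)).map (fun p => p.2), (1 : Int) ≤ y := by
      intro y hy
      obtain ⟨p, hp, _, hpy⟩ := (hmem y).mp hy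
      rcases cov p hp with ⟨_, h⟩ | ⟨_, h⟩ | ⟨_, h⟩ | ⟨_, h⟩ | ⟨_, h⟩ <;> omega
    rw [pv_min?_eq_of_mem_of_le _ 1 hm hall]
    simp [h1]
  · have hc1 : ∀ x ∈ pvP1, ¬ c x = true := List.any_eq_false.mp (by simpa using h1)
    by_cases h2 : pvP2.any c = true
    · obtain ⟨x, hx, hcx⟩ := List.any_eq_true.mp h2
      have hm : (2 : Int) ∈ (pvTable.filter (fun p => c p.1)).map (fun p => p.2) :=
        (hmem 2).mpr ⟨(x, 2), t2 x hx, hcx, rfl⟩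
      have hall : ∀ y ∈ (pvTable.filter (fun p => c p.1)).map (fun p => p.2), (2 : Int) ≤ y := by
        intro y hy
        obtain ⟨p, hp, hcp, hpy⟩ := (hmem y).mp hy
        rcases cov p hp with ⟨hin, h⟩ | ⟨_, h⟩ | ⟨_, h⟩ | ⟨_, h⟩ | ⟨_, h⟩
        · exact absurd hcp (hc1 p.1 hin)
        all_goals omega
      rw [pv_min?_eq_of_mem_of_le _ 2 hm hall]
      simp [h1, h2]
    · have hc2 : ∀ x ∈ pvP2, ¬ c x = true := List.any_eq_false.mp (by simpa using h2)
      by_cases h3 : pvP3.any c = true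
      · obtain ⟨x, hx, hcx⟩ := List.any_eq_true.mp h3
        have hm : (3 : Int) ∈ (pvTable.filter (fun p => c p.1)).map (fun p => p.2) :=
          (hmem 3).mpr ⟨(x, 3), t3 x hx, hcx, rfl⟩
        have hall : ∀ y ∈ (pvTable.filter (fun p => c p.1)).map (fun p => p.2), (3 : Int) ≤ y := by
          intro y hy
          obtain ⟨p, hp, hcp, hpy⟩ := (hmem y).mp hy
          rcases cov p hp with ⟨hin, h⟩ | ⟨hin, h⟩ | ⟨_, h⟩ | ⟨_, h⟩ | ⟨_, h⟩
          · exact absurd hcp (hc1 p.1 hin)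
          · exact absurd hcp (hc2 p.1 hin)
          all_goals omega
        rw [pv_min?_eq_of_mem_of_le _ 3 hm hall]
        simp [h1, h2, h3]
      · have hc3 : ∀ x ∈ pvP3, ¬ c x = true := List.any_eq_false.mp (by simpa using h3)
        by_cases h4 : pvP4.any c = true
        · obtain ⟨x, hx, hcx⟩ := List.any_eq_true.mp h4
          have hm : (4 : Int) ∈ (pvTable.filter (fun p => c p.1)).map (fun p => p.2) :=
            (hmem 4).mpr ⟨(x, 4), t4 x hx, hcx, rfl⟩
          have hall : ∀ y ∈ (pvTable.filter (fun p => c p.1)).map (fun p => p.2), (4 : Int) ≤ y := by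
            intro y hy
            obtain ⟨p, hp, hcp, hpy⟩ := (hmem y).mp hy
            rcases cov p hp with ⟨hin, h⟩ | ⟨hin, h⟩ | ⟨hin, h⟩ | ⟨_, h⟩ | ⟨_, h⟩
            · exact absurd hcp (hc1 p.1 hin)
            · exact absurd hcp (hc2 p.1 hin)
            · exact absurd hcp (hc3 p.1 hin)
            all_goals omega
          rw [pv_min?_eq_of_mem_of_le _ 4 hm hall]
          simp [h1, h2, h3, h4]
        · have hc4 : ∀ x ∈ pvP4, ¬ c x = true := List.any_eq_false.mp (by simpa using h4)
          by_cases h6 : pvP6.any c = true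
          · obtain ⟨x, hx, hcx⟩ := List.any_eq_true.mp h6
            have hm : (6 : Int) ∈ (pvTable.filter (fun p => c p.1)).map (fun p => p.2) :=
              (hmem 6).mpr ⟨(x, 6), t6 x hx, hcx, rfl⟩
            have hall : ∀ y ∈ (pvTable.filter (fun p => c p.1)).map (fun p => p.2), (6 : Int) ≤ y := by
              intro y hy
              obtain ⟨p, hp, hcp, hpy⟩ := (hmem y).mp hy
              rcases cov p hp with ⟨hin, h⟩ | ⟨hin, h⟩ | ⟨hin, h⟩ | ⟨hin, h⟩ | ⟨_, h⟩
              · exact absurd hcp (hc1 p.1 hin)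
              · exact absurd hcp (hc2 p.1 hin)
              · exact absurd hcp (hc3 p.1 hin)
              · exact absurd hcp (hc4 p.1 hin)
              all_goals omega
            rw [pv_min?_eq_of_mem_of_le _ 6 hm hall]
            simp [h1, h2, h3, h4, h6]
          · have hc6 : ∀ x ∈ pvP6, ¬ c x = true := List.any_eq_false.mp (by simpa using h6)
            have hnil : pvTable.filter (fun p => c p.1) = [] := by
              rw [List.filter_eq_nil_iff]
              intro p hp
              rcases cov p hp with ⟨hin, _⟩ | ⟨hin, _⟩ | ⟨hin, _⟩ | ⟨hin, _⟩ | ⟨hin, _⟩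
              · exact hc1 p.1 hin
              · exact hc2 p.1 hin
              · exact hc3 p.1 hin
              · exact hc4 p.1 hin
              · exact hc6 p.1 hin
            rw [hnil]
            simp [h1, h2, h3, h4, h6, PySem.List.min?]

-- ===== VERDICT (by name: the statement is the Claim_ definition above) =====
theorem getPrecipation_py_spec : Claim_equal_getPrecipation_py := by
  intro input _
  unfold Spec_getPrecipation_py getPrecipation_py getPrecipation_py_alt
  exact pv_chain_eq_min (fun x => PySem.Str.isIn x (PySem.Str.lower input))
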